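-- pv_equiv track=rewrite | github.com/benbendaisy/CommunicationCodes | python_module/examples/730_Count_Different_Palindromic_Subsequences.py | countPalindromicSubsequences3
-- ===== SOURCE A (Python) =====
-- from functools import lru_cache
--
-- def countPalindromicSubsequences3(s: str) -> int:
--     mod = 10**9 + 7
--
--     @lru_cache(None)
--     def helper(left: int, right: int) -> int:
--         if left > right:
--             return 0
--         if left == right:
--             return 1  # A single character is a palindromic subsequence
--
--         # Case 1: When s[left] == s[right]
--         if s[left] == s[right]:
--             l, r = left + 1, right - 1
--
--             # Find the first and last occurrence of s[left] between (left+1, right-1)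
--             while l <= r and s[l] != s[left]:
--                 l += 1
--             while l <= r and s[r] != s[left]:
--                 r -= 1
--
--             if l > r:
--                 count = 2 * helper(left + 1, right - 1) + 2  # No duplicate characters inside
--             elif l == r:
--                 count = 2 * helper(left + 1, right - 1) + 1  # One duplicate character inside
--             else:
--                 count = 2 * helper(left + 1, right - 1) - helper(l + 1, r - 1)  # Remove double-counting
--
--         # Case 2: When s[left] != s[right]
--         else:
--             count = helper(left + 1, right) + helper(left, right - 1) - helper(left + 1, right - 1)
--
--         return count % mod
--
--     return helper(0, len(s) - 1)
-- ===== SOURCE B (Python) =====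
-- def countPalindromicSubsequences3(s: str) -> int:
--     mod = 10**9 + 7
--     n = len(s)
--     if n == 0:
--         return 0
--     nxt = [n]*n; last = {}
--     for i in range(n - 1, -1, -1):
--         nxt[i] = last.get(s[i], n); last[s[i]] = i
--     prv = [-1]*n; last = {}
--     for i in range(n):
--         prv[i] = last.get(s[i], -1); last[s[i]] = i
--     dp = [[0]*n for _ in range(n)]
--     for i in range(n): dp[i][i] = 1
--     for w in range(1, n):
--         for left in range(n - w):
--             right = left + w
--             if s[left] == s[right]:
--                 l = nxt[left]; r = prv[right]
--                 if l == right: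
--                     v = 2 * dp[left+1][right-1] + 2
--                 elif l == r:
--                     v = 2 * dp[left+1][right-1] + 1
--                 else:
--                     v = 2 * dp[left+1][right-1] - dp[l+1][r-1]
--             else:
--                 v = dp[left+1][right] + dp[left][right-1] - dp[left+1][right-1]
--             dp[left][right] = v % mod
--     return dp[0][n-1]
-- ===== Notes on version B (the rewrite author's own statement) =====
-- stated objective: faster
-- what changed: Replaces A's lru_cache top-down recursion with per-call inner while-scans for the boundary character by an iterative bottom-up DP table over interval widths that reads first/last-occurrence information from next/prev occurrence arrays precomputed in one O(n) pass each, removing the inner scans.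
import Mathlib
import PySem

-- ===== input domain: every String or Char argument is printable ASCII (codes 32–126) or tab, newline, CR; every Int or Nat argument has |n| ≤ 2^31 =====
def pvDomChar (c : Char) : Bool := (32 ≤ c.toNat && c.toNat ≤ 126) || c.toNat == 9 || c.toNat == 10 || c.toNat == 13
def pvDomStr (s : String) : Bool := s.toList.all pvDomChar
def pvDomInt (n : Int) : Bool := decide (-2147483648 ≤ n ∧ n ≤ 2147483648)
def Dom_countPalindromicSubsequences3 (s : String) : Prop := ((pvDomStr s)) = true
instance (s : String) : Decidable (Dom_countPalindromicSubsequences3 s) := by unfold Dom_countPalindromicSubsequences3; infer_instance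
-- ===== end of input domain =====

-- B replaces A's memoized recursion with inner while-scans by a bottom-up DP table over widths
-- reading O(n)-precomputed next/previous same-character occurrence arrays (objective: faster).

-- ===== PORT A =====
-- while l <= r and s[l] != s[left]: l += 1
def pvScanUp (cs : List Char) (c : Char) (r : Int) (l : Int) : Int :=
  if _h : l ≤ r then
    if PySem.List.pyGetD cs l ' ' ≠ c then pvScanUp cs c r (l + 1) else l
  else l
termination_by (r + 1 - l).toNat
decreasing_by omega

-- while l <= r and s[r] != s[left]: r -= 1
def pvScanDn (cs : List Char) (c : Char) (l : Int) (r : Int) : Int :=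
  if _h : l ≤ r then
    if PySem.List.pyGetD cs r ' ' ≠ c then pvScanDn cs c l (r - 1) else r
  else r
termination_by (r + 1 - l).toNat
decreasing_by omega

-- helper(left, right); the Nat fuel only makes the recursion structural, it is never
-- exhausted on the call A makes (proved by the fuel-irrelevance lemma below)
def pvHelper (cs : List Char) : Nat → Int → Int → Int
  | 0, _, _ => 0
  | f + 1, left, right =>
    if left > right then 0
    else if left = right then 1
    else
      let cl := PySem.List.pyGetD cs left ' '
      let cr := PySem.List.pyGetD cs right ' '
      let count :=
        if cl = cr then
          let l := pvScanUp cs cl (right - 1) (left + 1)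
          let r := pvScanDn cs cl (left + 1) (right - 1)
          if l > r then 2 * pvHelper cs f (left + 1) (right - 1) + 2
          else if l = r then 2 * pvHelper cs f (left + 1) (right - 1) + 1
          else 2 * pvHelper cs f (left + 1) (right - 1) - pvHelper cs f (l + 1) (r - 1)
        else
          pvHelper cs f (left + 1) right + pvHelper cs f left (right - 1)
            - pvHelper cs f (left + 1) (right - 1)
      PySem.Int.mod count (10 ^ 9 + 7)

def countPalindromicSubsequences3 (s : String) : Int :=
  pvHelper s.toList (s.toList.length + 1) 0 ((s.toList.length : Int) - 1)

-- ===== PORT B =====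
-- nxt[i] = smallest j > i with s[j] == s[i], else n  (built right-to-left with a last-seen dict)
def pvMkNxt (cs : List Char) : List Int :=
  ((PySem.List.pyRange ((cs.length : Int) - 1) (-1) (-1)).foldl
    (fun st i =>
      (PySem.List.pySetD st.1 i (st.2.getD (PySem.List.pyGetD cs i ' ') (cs.length : Int)),
       st.2.insert (PySem.List.pyGetD cs i ' ') i))
    (List.replicate cs.length (cs.length : Int), (PySem.Dict.empty : PySem.Dict Char Int))).1

-- prv[i] = largest j < i with s[j] == s[i], else -1  (built left-to-right)
def pvMkPrv (cs : List Char) : List Int :=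
  ((PySem.List.pyRange 0 (cs.length : Int) 1).foldl
    (fun st i =>
      (PySem.List.pySetD st.1 i (st.2.getD (PySem.List.pyGetD cs i ' ') (-1)),
       st.2.insert (PySem.List.pyGetD cs i ' ') i))
    (List.replicate cs.length (-1 : Int), (PySem.Dict.empty : PySem.Dict Char Int))).1

-- dp[a][b] (reads of untouched cells see the stored 0)
def pvG (dp : List (List Int)) (a b : Int) : Int :=
  PySem.List.pyGetD (PySem.List.pyGetD dp a []) b 0

-- the value v computed for cell (left, left+w)
def pvCell (cs : List Char) (nxt prv : List Int) (dp : List (List Int)) (w left : Int) : Int :=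
  let right := left + w
  if PySem.List.pyGetD cs left ' ' = PySem.List.pyGetD cs right ' ' then
    let l := PySem.List.pyGetD nxt left 0
    let r := PySem.List.pyGetD prv right 0
    if l = right then 2 * pvG dp (left + 1) (right - 1) + 2
    else if l = r then 2 * pvG dp (left + 1) (right - 1) + 1
    else 2 * pvG dp (left + 1) (right - 1) - pvG dp (l + 1) (r - 1)
  else pvG dp (left + 1) right + pvG dp left (right - 1) - pvG dp (left + 1) (right - 1)

-- dp[left][right] = v % mod
def pvStep (cs : List Char) (nxt prv : List Int) (dp : List (List Int)) (w left : Int) :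
    List (List Int) :=
  PySem.List.pySetD dp left
    (PySem.List.pySetD (PySem.List.pyGetD dp left []) (left + w)
      (PySem.Int.mod (pvCell cs nxt prv dp w left) (10 ^ 9 + 7)))

-- dp = [[0]*n for _ in range(n)]; for i in range(n): dp[i][i] = 1
def pvDpInit (cs : List Char) : List (List Int) :=
  (PySem.List.pyRange 0 (cs.length : Int) 1).foldl
    (fun dp i => PySem.List.pySetD dp i (PySem.List.pySetD (PySem.List.pyGetD dp i []) i 1))
    ((PySem.List.pyRange 0 (cs.length : Int) 1).map (fun _ => List.replicate cs.length (0 : Int)))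

def countPalindromicSubsequences3_alt (s : String) : Int :=
  let cs := s.toList
  let n : Int := cs.length
  if n = 0 then 0
  else
    let nxt := pvMkNxt cs
    let prv := pvMkPrv cs
    let dp := (PySem.List.pyRange 1 n 1).foldl
      (fun dp w =>
        (PySem.List.pyRange 0 (n - w) 1).foldl (fun dp left => pvStep cs nxt prv dp w left) dp)
      (pvDpInit cs)
    pvG dp 0 (n - 1)

-- ===== PRECONDITION & SPEC =====
def Spec_countPalindromicSubsequences3 (s : String) (out : Int) : Prop := out = countPalindromicSubsequences3_alt s
instance (s : String) (out : Int) : Decidable (Spec_countPalindromicSubsequences3 s out) := by unfold Spec_countPalindromicSubsequences3; infer_instance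

-- ===== CLAIM (what is proved, stated in full; the proofs are below) =====
def Claim_equal_countPalindromicSubsequences3 : Prop := ∀ (s : String), Dom_countPalindromicSubsequences3 s → Spec_countPalindromicSubsequences3 s (countPalindromicSubsequences3 s)

-- ===== LEMMAS AND PROOFS =====

-- canonical value of cell (a, b): A's helper with just-sufficient fuel
def pvH (cs : List Char) (a b : Int) : Int := pvHelper cs ((b - a).toNat + 2) a b

theorem pvScanUp_spec (cs : List Char) (c : Char) (r : Int) (l : Int) (hl : l ≤ r + 1) :
    (l ≤ pvScanUp cs c r l ∧ pvScanUp cs c r l ≤ r + 1) ∧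
    (∀ j, l ≤ j → j < pvScanUp cs c r l → PySem.List.pyGetD cs j ' ' ≠ c) ∧
    (pvScanUp cs c r l ≤ r → PySem.List.pyGetD cs (pvScanUp cs c r l) ' ' = c) := by
  rw [pvScanUp]
  split
  case isTrue h =>
    split
    case isTrue hne =>
      have IH := pvScanUp_spec cs c r (l + 1) (by omega)
      refine ⟨⟨by omega, IH.1.2⟩, ?_, IH.2.2⟩
      intro j hj1 hj2
      rcases eq_or_lt_of_le hj1 with rfl | hlt
      · exact hne
      · exact IH.2.1 j (by omega) hj2
    case isFalse hne =>
      refine ⟨⟨le_refl l, by omega⟩, ?_, fun _ => by simpa using hne⟩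
      intro j hj1 hj2; omega
  case isFalse h =>
    refine ⟨⟨le_refl l, hl⟩, ?_, fun hle => absurd (by omega : l ≤ r) h⟩
    intro j hj1 hj2; omega
termination_by (r + 1 - l).toNat

theorem pvScanDn_spec (cs : List Char) (c : Char) (l : Int) (r : Int) (hr : l - 1 ≤ r) :
    (l - 1 ≤ pvScanDn cs c l r ∧ pvScanDn cs c l r ≤ r) ∧
    (∀ j, pvScanDn cs c l r < j → j ≤ r → PySem.List.pyGetD cs j ' ' ≠ c) ∧
    (l ≤ pvScanDn cs c l r → PySem.List.pyGetD cs (pvScanDn cs c l r) ' ' = c) := by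
  rw [pvScanDn]
  split
  case isTrue h =>
    split
    case isTrue hne =>
      have IH := pvScanDn_spec cs c l (r - 1) (by omega)
      refine ⟨⟨IH.1.1, by omega⟩, ?_, IH.2.2⟩
      intro j hj1 hj2
      rcases eq_or_lt_of_le hj2 with rfl | hlt
      · exact hne
      · exact IH.2.1 j hj1 (by omega)
    case isFalse hne =>
      refine ⟨⟨by omega, le_refl r⟩, ?_, fun _ => by simpa using hne⟩
      intro j hj1 hj2; omega
  case isFalse h =>
    refine ⟨⟨hr, le_refl r⟩, ?_, fun hle => absurd (by omega : l ≤ r) h⟩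
    intro j hj1 hj2; omega
termination_by (r + 1 - l).toNat

theorem pvScanUp_trunc (cs : List Char) (c : Char) (r r' l : Int) (hrr : r ≤ r')
    (hl : l ≤ r + 1) (hub : pvScanUp cs c r' l ≤ r + 1) :
    pvScanUp cs c r l = pvScanUp cs c r' l := by
  by_cases h : l ≤ r
  · by_cases hc : PySem.List.pyGetD cs l ' ' = c
    · have e1 : pvScanUp cs c r l = l := by rw [pvScanUp]; simp [h, hc]
      have e2 : pvScanUp cs c r' l = l := by rw [pvScanUp]; simp [h.trans hrr, hc]
      rw [e1, e2]
    · have e1 : pvScanUp cs c r l = pvScanUp cs c r (l + 1) := by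
        rw [pvScanUp]; simp [h, hc]
      have e2 : pvScanUp cs c r' l = pvScanUp cs c r' (l + 1) := by
        rw [pvScanUp]; simp [h.trans hrr, hc]
      rw [e1, e2]
      exact pvScanUp_trunc cs c r r' (l + 1) hrr (by omega) (e2 ▸ hub)
  · have e1 : pvScanUp cs c r l = l := by rw [pvScanUp]; simp [h]
    have hge := (pvScanUp_spec cs c r' l (by omega)).1.1
    omega
termination_by (r + 1 - l).toNat

theorem pvScanDn_trunc (cs : List Char) (c : Char) (l l' r : Int) (hll : l' ≤ l)
    (hr : l - 1 ≤ r) (hlb : l - 1 ≤ pvScanDn cs c l' r) :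
    pvScanDn cs c l r = pvScanDn cs c l' r := by
  by_cases h : l ≤ r
  · by_cases hc : PySem.List.pyGetD cs r ' ' = c
    · have e1 : pvScanDn cs c l r = r := by rw [pvScanDn]; simp [h, hc]
      have e2 : pvScanDn cs c l' r = r := by rw [pvScanDn]; simp [hll.trans h, hc]
      rw [e1, e2]
    · have e1 : pvScanDn cs c l r = pvScanDn cs c l (r - 1) := by
        rw [pvScanDn]; simp [h, hc]
      have e2 : pvScanDn cs c l' r = pvScanDn cs c l' (r - 1) := by
        rw [pvScanDn]; simp [hll.trans h, hc]
      rw [e1, e2]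
      exact pvScanDn_trunc cs c l l' (r - 1) hll (by omega) (e2 ▸ hlb)
  · have e1 : pvScanDn cs c l r = r := by rw [pvScanDn]; simp [h]
    have hle := (pvScanDn_spec cs c l' r (by omega)).1.2
    omega
termination_by (r + 1 - l).toNat

theorem pvHelper_cross (cs : List Char) (f : Nat) (a b : Int) (h : b < a) :
    pvHelper cs f a b = 0 := by
  cases f with
  | zero => rfl
  | succ f => rw [pvHelper]; simp [show a > b from h]

theorem pvHelper_diag (cs : List Char) (f : Nat) (a : Int) :
    pvHelper cs (f + 1) a a = 1 := by
  rw [pvHelper]; simp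

theorem pvHelper_fuel (cs : List Char) : ∀ (w : Nat) (f g : Nat) (a b : Int),
    (b - a).toNat = w → w + 2 ≤ f → w + 2 ≤ g → pvHelper cs f a b = pvHelper cs g a b := by
  intro w
  induction w using Nat.strong_induction_on with
  | _ w IH =>
    intro f g a b hw hf hg
    obtain ⟨f', rfl⟩ : ∃ f', f = f' + 1 := ⟨f - 1, by omega⟩
    obtain ⟨g', rfl⟩ : ∃ g', g = g' + 1 := ⟨g - 1, by omega⟩
    rw [pvHelper]
    conv_rhs => rw [pvHelper]
    by_cases h1 : a > b
    · simp [h1]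
    by_cases h2 : a = b
    · simp [h2]
    simp only [if_neg h1, if_neg h2]
    have hab : a < b := by omega
    have hw1 : 1 ≤ w := by omega
    have sub : ∀ (x y : Int), a ≤ x → y ≤ b → y - x ≤ b - a - 1 →
        pvHelper cs f' x y = pvHelper cs g' x y := by
      intro x y hx hy hxy
      by_cases hc : y < x
      · rw [pvHelper_cross cs f' x y hc, pvHelper_cross cs g' x y hc]
      · exact IH (y - x).toNat (by omega) f' g' x y rfl (by omega) (by omega)
    congr 1
    split
    next hcl =>
      have hls := (pvScanUp_spec cs (PySem.List.pyGetD cs a ' ') (b - 1) (a + 1) (by omega)).1.1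
      have hrs := (pvScanDn_spec cs (PySem.List.pyGetD cs a ' ') (a + 1) (b - 1) (by omega)).1.2
      split
      next h3 => rw [sub (a+1) (b-1) (by omega) (by omega) (by omega)]
      next h3 =>
        split
        next h4 => rw [sub (a+1) (b-1) (by omega) (by omega) (by omega)]
        next h4 =>
          rw [sub (a+1) (b-1) (by omega) (by omega) (by omega),
              sub _ _ (by omega) (by omega) (by omega)]
    next hcl =>
      rw [sub (a+1) b (by omega) le_rfl (by omega), sub a (b-1) le_rfl (by omega) (by omega),
          sub (a+1) (b-1) (by omega) (by omega) (by omega)]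

-- nonnegative-index forms
theorem pvGetD_nonneg {α : Type} (xs : List α) (i : Int) (d : α) (h : 0 ≤ i) :
    PySem.List.pyGetD xs i d = xs.getD i.toNat d := by
  have := PySem.List.pyGetD_natCast (xs := xs) (n := i.toNat) (d := d)
  rwa [Int.toNat_of_nonneg h] at this

theorem pvGetD_replicate (n : Nat) (b : Int) (v : Int) (hb : 0 ≤ b) :
    PySem.List.pyGetD (List.replicate n v) b v = v := by
  rw [pvGetD_nonneg _ _ _ hb]
  by_cases h : b.toNat < n
  · simp [List.getD_eq_getElem?_getD, h]
  · simp [List.getD_eq_getElem?_getD, h]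

theorem pvG_set (dp : List (List Int)) (l r v a b : Int)
    (h0l : 0 ≤ l) (h0r : 0 ≤ r) (hrN : r.toNat < (dp.getD l.toNat []).length)
    (h0a : 0 ≤ a) (h0b : 0 ≤ b) :
    pvG (PySem.List.pySetD dp l
          (PySem.List.pySetD (PySem.List.pyGetD dp l []) r v)) a b
      = if a = l ∧ b = r then v else pvG dp a b := by
  have hlN : l.toNat < dp.length := by
    by_contra hcon
    have he : dp.getD l.toNat [] = [] := by
      rw [List.getD_eq_getElem?_getD, List.getElem?_eq_none_iff.mpr (by omega)]; rfl
    rw [he] at hrN; simp at hrN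
  unfold pvG
  rw [PySem.List.pySetD_of_nonneg _ _ h0l, PySem.List.pySetD_of_nonneg _ _ h0r,
      pvGetD_nonneg _ _ _ h0l]
  rw [pvGetD_nonneg _ _ _ h0a, pvGetD_nonneg _ _ _ h0b,
      pvGetD_nonneg _ _ _ h0a, pvGetD_nonneg _ _ _ h0b]
  by_cases hal : a = l
  · subst hal
    have h1 : (dp.set a.toNat ((dp.getD a.toNat []).set r.toNat v)).getD a.toNat []
        = (dp.getD a.toNat []).set r.toNat v := by
      rw [List.getD_eq_getElem?_getD, List.getElem?_set_self (by simpa using hlN),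
          Option.getD_some]
    rw [h1]
    by_cases hbr : b = r
    · subst hbr
      rw [List.getD_eq_getElem?_getD, List.getElem?_set_self hrN, Option.getD_some]
      simp
    · rw [List.getD_eq_getElem?_getD, List.getElem?_set_ne (by omega),
          ← List.getD_eq_getElem?_getD]
      simp [hbr]
  · have h2 : (dp.set l.toNat ((dp.getD l.toNat []).set r.toNat v)).getD a.toNat []
        = dp.getD a.toNat [] := by
      rw [List.getD_eq_getElem?_getD, List.getElem?_set_ne (by omega),
          ← List.getD_eq_getElem?_getD]
    rw [h2]
    simp [hal]

theorem pvSetGet (xs : List Int) (k i v : Int) (h0 : 0 ≤ k) (hk : k.toNat < xs.length)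
    (h0i : 0 ≤ i) :
    PySem.List.pyGetD (PySem.List.pySetD xs k v) i 0
      = if i = k then v else PySem.List.pyGetD xs i 0 := by
  rw [PySem.List.pySetD_of_nonneg _ _ h0, pvGetD_nonneg _ _ _ h0i, pvGetD_nonneg _ _ _ h0i]
  by_cases hik : i = k
  · subst hik
    rw [List.getD_eq_getElem?_getD, List.getElem?_set_self hk, Option.getD_some]
    simp
  · rw [List.getD_eq_getElem?_getD, List.getElem?_set_ne (by omega),
        ← List.getD_eq_getElem?_getD]
    simp [hik]

theorem pvNxtFold (cs : List Char) (k : Int) (st : List Int × PySem.Dict Char Int)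
    (hk0 : -1 ≤ k) (hk1 : k ≤ (cs.length : Int) - 1) (hlen : st.1.length = cs.length)
    (hd : ∀ c, st.2.getD c (cs.length : Int)
      = pvScanUp cs c ((cs.length : Int) - 1) (k + 1))
    (hl : ∀ i : Int, k < i → 0 ≤ i → i < (cs.length : Int) →
      PySem.List.pyGetD st.1 i 0
        = pvScanUp cs (PySem.List.pyGetD cs i ' ') ((cs.length : Int) - 1) (i + 1)) :
    ((PySem.List.pyRange k (-1) (-1)).foldl
      (fun st i =>
        (PySem.List.pySetD st.1 i (st.2.getD (PySem.List.pyGetD cs i ' ') (cs.length : Int)),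
         st.2.insert (PySem.List.pyGetD cs i ' ') i)) st).1.length = cs.length ∧
    ∀ i : Int, 0 ≤ i → i < (cs.length : Int) →
      PySem.List.pyGetD ((PySem.List.pyRange k (-1) (-1)).foldl
        (fun st i =>
          (PySem.List.pySetD st.1 i (st.2.getD (PySem.List.pyGetD cs i ' ') (cs.length : Int)),
           st.2.insert (PySem.List.pyGetD cs i ' ') i)) st).1 i 0
        = pvScanUp cs (PySem.List.pyGetD cs i ' ') ((cs.length : Int) - 1) (i + 1) := by
  by_cases hneg : k ≤ -1
  · rw [PySem.List.pyRange_neg_one_eq_nil hneg]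
    exact ⟨hlen, fun i h1 h2 => hl i (by omega) h1 h2⟩
  · rw [PySem.List.pyRange_neg_one_cons (by omega : (-1 : Int) < k), List.foldl_cons]
    refine pvNxtFold cs (k - 1) _ (by omega) (by omega) (by simpa using hlen) ?_ ?_
    · intro c
      simp only [PySem.Dict.getD_insert]
      conv_rhs => rw [pvScanUp]
      simp only [show k - 1 + 1 = k from by ring]
      rw [dif_pos (show k ≤ (cs.length : Int) - 1 from hk1)]
      by_cases hc : c = PySem.List.pyGetD cs k ' '
      · rw [if_pos hc, if_neg (by simp [hc])]
      · rw [if_neg hc, if_pos (by simpa using Ne.symm hc)]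
        exact hd c
    · intro i hi1 hi2 hi3
      rw [pvSetGet st.1 k i _ (by omega) (by omega) hi2]
      by_cases hik : i = k
      · subst hik
        rw [if_pos rfl, hd]
      · rw [if_neg hik]
        exact hl i (by omega) hi2 hi3
termination_by (k + 1).toNat

theorem pvPrvFold (cs : List Char) (k : Int) (st : List Int × PySem.Dict Char Int)
    (hk0 : 0 ≤ k) (hk1 : k ≤ (cs.length : Int)) (hlen : st.1.length = cs.length)
    (hd : ∀ c, st.2.getD c (-1) = pvScanDn cs c 0 (k - 1))
    (hl : ∀ i : Int, i < k → 0 ≤ i →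
      PySem.List.pyGetD st.1 i 0
        = pvScanDn cs (PySem.List.pyGetD cs i ' ') 0 (i - 1)) :
    ((PySem.List.pyRange k (cs.length : Int) 1).foldl
      (fun st i =>
        (PySem.List.pySetD st.1 i (st.2.getD (PySem.List.pyGetD cs i ' ') (-1)),
         st.2.insert (PySem.List.pyGetD cs i ' ') i)) st).1.length = cs.length ∧
    ∀ i : Int, 0 ≤ i → i < (cs.length : Int) →
      PySem.List.pyGetD ((PySem.List.pyRange k (cs.length : Int) 1).foldl
        (fun st i =>
          (PySem.List.pySetD st.1 i (st.2.getD (PySem.List.pyGetD cs i ' ') (-1)),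
           st.2.insert (PySem.List.pyGetD cs i ' ') i)) st).1 i 0
        = pvScanDn cs (PySem.List.pyGetD cs i ' ') 0 (i - 1) := by
  by_cases hend : (cs.length : Int) ≤ k
  · rw [PySem.List.pyRange_one_eq_nil hend]
    exact ⟨hlen, fun i h1 h2 => hl i (by omega) h1⟩
  · rw [PySem.List.pyRange_one_cons (by omega : k < (cs.length : Int)), List.foldl_cons]
    refine pvPrvFold cs (k + 1) _ (by omega) (by omega) (by simpa using hlen) ?_ ?_
    · intro c
      simp only [PySem.Dict.getD_insert]
      conv_rhs => rw [pvScanDn]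
      simp only [show k + 1 - 1 = k from by ring]
      rw [dif_pos (show (0 : Int) ≤ k from hk0)]
      by_cases hc : c = PySem.List.pyGetD cs k ' '
      · rw [if_pos hc, if_neg (by simp [hc])]
      · rw [if_neg hc, if_pos (by simpa using Ne.symm hc)]
        exact hd c
    · intro i hi1 hi2
      rw [pvSetGet st.1 k i _ (by omega) (by omega) hi2]
      by_cases hik : i = k
      · subst hik
        rw [if_pos rfl, hd]
      · rw [if_neg hik]
        exact hl i (by omega) hi2
termination_by ((cs.length : Int) - k).toNat

theorem pvMkNxt_parts (cs : List Char) : (pvMkNxt cs).length = cs.length ∧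
    ∀ i : Int, 0 ≤ i → i < (cs.length : Int) →
      PySem.List.pyGetD (pvMkNxt cs) i 0
        = pvScanUp cs (PySem.List.pyGetD cs i ' ') ((cs.length : Int) - 1) (i + 1) := by
  unfold pvMkNxt
  refine pvNxtFold cs ((cs.length : Int) - 1) _ (by omega) (by omega)
    (by simp) ?_ (by intro i h1 h2 h3; omega)
  intro c
  rw [PySem.Dict.getD_empty]
  rw [pvScanUp]
  simp

theorem pvMkPrv_parts (cs : List Char) : (pvMkPrv cs).length = cs.length ∧
    ∀ i : Int, 0 ≤ i → i < (cs.length : Int) →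
      PySem.List.pyGetD (pvMkPrv cs) i 0
        = pvScanDn cs (PySem.List.pyGetD cs i ' ') 0 (i - 1) := by
  unfold pvMkPrv
  refine pvPrvFold cs 0 _ (by omega) (by omega) (by simp) ?_ (by intro i h1 h2; omega)
  intro c
  rw [PySem.Dict.getD_empty]
  rw [pvScanDn]
  simp

-- invariant: cells of width < w are filled, plus cells of width exactly w left of `left`
def pvInvAt (cs : List Char) (dp : List (List Int)) (w left : Int) : Prop :=
  dp.length = cs.length ∧ (∀ row ∈ dp, row.length = cs.length) ∧
  ∀ a b : Int, 0 ≤ a → 0 ≤ b →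
    pvG dp a b =
      if a ≤ b ∧ b < (cs.length : Int) ∧ (b - a < w ∨ (b - a = w ∧ a < left)) then pvH cs a b
      else 0

theorem pvRowLen (cs : List Char) (dp : List (List Int)) (hlen : dp.length = cs.length)
    (hrows : ∀ row ∈ dp, row.length = cs.length) (l : Int) (h0 : 0 ≤ l)
    (hn : l < (cs.length : Int)) : (dp.getD l.toNat []).length = cs.length := by
  have hl : l.toNat < dp.length := by omega
  rw [List.getD_eq_getElem?_getD, List.getElem?_eq_getElem hl, Option.getD_some]
  exact hrows _ (List.getElem_mem hl)

theorem pvRowsSet (cs : List Char) (dp : List (List Int))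
    (hrows : ∀ row ∈ dp, row.length = cs.length) (k : Nat) (row : List Int)
    (hrow : row.length = cs.length) : ∀ r ∈ dp.set k row, r.length = cs.length := by
  intro r hr
  rcases List.mem_or_eq_of_mem_set hr with h | h
  · exact hrows r h
  · rw [h]; exact hrow

theorem pvInitFold (cs : List Char) (k : Int) (dp : List (List Int))
    (hk0 : 0 ≤ k) (hk1 : k ≤ (cs.length : Int))
    (hlen : dp.length = cs.length) (hrows : ∀ row ∈ dp, row.length = cs.length)
    (hg : ∀ a b : Int, 0 ≤ a → 0 ≤ b → pvG dp a b = if a = b ∧ a < k then 1 else 0) :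
    ((PySem.List.pyRange k (cs.length : Int) 1).foldl
      (fun dp i =>
        PySem.List.pySetD dp i (PySem.List.pySetD (PySem.List.pyGetD dp i []) i 1)) dp).length
      = cs.length ∧
    (∀ row ∈ (PySem.List.pyRange k (cs.length : Int) 1).foldl
      (fun dp i =>
        PySem.List.pySetD dp i (PySem.List.pySetD (PySem.List.pyGetD dp i []) i 1)) dp,
      row.length = cs.length) ∧
    ∀ a b : Int, 0 ≤ a → 0 ≤ b →
      pvG ((PySem.List.pyRange k (cs.length : Int) 1).foldl
        (fun dp i =>
          PySem.List.pySetD dp i (PySem.List.pySetD (PySem.List.pyGetD dp i []) i 1)) dp) a b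
        = if a = b ∧ a < (cs.length : Int) then 1 else 0 := by
  by_cases hend : (cs.length : Int) ≤ k
  · have hkn : k = (cs.length : Int) := by omega
    subst hkn
    rw [PySem.List.pyRange_one_eq_nil le_rfl]
    exact ⟨hlen, hrows, hg⟩
  · rw [PySem.List.pyRange_one_cons (by omega : k < (cs.length : Int)), List.foldl_cons]
    have hrl : (dp.getD k.toNat []).length = cs.length :=
      pvRowLen cs dp hlen hrows k hk0 (by omega)
    refine pvInitFold cs (k + 1) _ (by omega) (by omega) (by simpa using hlen) ?_ ?_
    · rw [PySem.List.pySetD_of_nonneg _ _ hk0]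
      refine pvRowsSet cs dp hrows k.toNat _ ?_
      rw [PySem.List.length_pySetD, pvGetD_nonneg _ _ _ hk0]
      exact hrl
    · intro a b ha hb
      rw [pvG_set dp k k 1 a b hk0 hk0 (by omega) ha hb, hg a b ha hb]
      by_cases h1 : a = k ∧ b = k
      · rw [if_pos h1, if_pos (by omega)]
      · rw [if_neg h1]
        by_cases h2 : a = b ∧ a < k
        · rw [if_pos h2, if_pos (by omega)]
        · rw [if_neg h2, if_neg (by omega)]
termination_by ((cs.length : Int) - k).toNat

theorem pvDpInit_inv (cs : List Char) : pvInvAt cs (pvDpInit cs) 1 0 := by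
  unfold pvDpInit
  have hbase := pvInitFold cs 0
    ((PySem.List.pyRange 0 (cs.length : Int) 1).map (fun _ => List.replicate cs.length (0 : Int)))
    le_rfl (by omega)
    (by simp [PySem.List.length_pyRange_one])
    (by intro row hrow
        rcases List.mem_map.mp hrow with ⟨_, _, rfl⟩
        simp)
    (by intro a b ha hb
        rw [if_neg (by omega)]
        unfold pvG
        rw [pvGetD_nonneg _ _ _ ha]
        by_cases hlt : a.toNat < ((PySem.List.pyRange 0 (cs.length : Int) 1).map
            (fun _ => List.replicate cs.length (0 : Int))).length
        · rw [List.getD_eq_getElem?_getD, List.getElem?_eq_getElem hlt, Option.getD_some,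
              List.getElem_map]
          exact pvGetD_replicate cs.length b 0 hb
        · rw [List.getD_eq_getElem?_getD, List.getElem?_eq_none_iff.mpr (by omega),
              Option.getD_none]
          rw [pvGetD_nonneg _ _ _ hb]
          simp)
  refine ⟨hbase.1, hbase.2.1, ?_⟩
  intro a b ha hb
  rw [hbase.2.2 a b ha hb]
  by_cases h1 : a = b ∧ a < (cs.length : Int)
  · rw [if_pos h1, if_pos (by omega)]
    obtain ⟨rfl, -⟩ := h1
    rw [pvH]
    simp only [show a - a = 0 from by ring, Int.toNat_zero]
    exact (pvHelper_diag cs 1 a).symm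
  · rw [if_neg h1, if_neg (by omega)]

theorem pvCell_correct (cs : List Char) (dp : List (List Int)) (w left : Int)
    (hw : 1 ≤ w) (h0 : 0 ≤ left) (hr : left + w < (cs.length : Int))
    (hInv : pvInvAt cs dp w left) :
    PySem.Int.mod (pvCell cs (pvMkNxt cs) (pvMkPrv cs) dp w left) (10 ^ 9 + 7)
      = pvH cs left (left + w) := by
  have e1 : pvG dp (left + 1) (left + w - 1)
      = pvHelper cs (w.toNat + 1) (left + 1) (left + w - 1) := by
    by_cases hcr : left + w - 1 < left + 1
    · rw [hInv.2.2 (left + 1) (left + w - 1) (by omega) (by omega), if_neg (by omega),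
          pvHelper_cross cs _ _ _ (by omega)]
    · rw [hInv.2.2 (left + 1) (left + w - 1) (by omega) (by omega), if_pos (by omega), pvH]
      exact pvHelper_fuel cs (left + w - 1 - (left + 1)).toNat _ _ _ _ rfl le_rfl (by omega)
  rw [pvH, show left + w - left = w from by ring,
      show w.toNat + 2 = (w.toNat + 1) + 1 from rfl, pvHelper,
      if_neg (show ¬ left > left + w from by omega),
      if_neg (show ¬ left = left + w from by omega)]
  unfold pvCell
  simp only []
  congr 1
  by_cases hc : PySem.List.pyGetD cs left ' ' = PySem.List.pyGetD cs (left + w) ' '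
  · rw [if_pos hc, if_pos hc]
    have hnx := (pvMkNxt_parts cs).2 left h0 (by omega)
    have hpv := (pvMkPrv_parts cs).2 (left + w) (by omega) (by omega)
    rw [← hc] at hpv
    have sU := pvScanUp_spec cs (PySem.List.pyGetD cs left ' ')
      ((cs.length : Int) - 1) (left + 1) (by omega)
    have hLle : pvScanUp cs (PySem.List.pyGetD cs left ' ')
        ((cs.length : Int) - 1) (left + 1) ≤ left + w := by
      by_contra hcon
      exact sU.2.1 (left + w) (by omega) (by omega) hc.symm
    have sD := pvScanDn_spec cs (PySem.List.pyGetD cs left ' ') 0 (left + w - 1) (by omega)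
    have hRge : left ≤ pvScanDn cs (PySem.List.pyGetD cs left ' ') 0 (left + w - 1) := by
      by_contra hcon
      exact sD.2.1 left (by omega) (by omega) rfl
    have tU : pvScanUp cs (PySem.List.pyGetD cs left ' ') (left + w - 1) (left + 1)
        = pvScanUp cs (PySem.List.pyGetD cs left ' ') ((cs.length : Int) - 1) (left + 1) :=
      pvScanUp_trunc cs _ (left + w - 1) ((cs.length : Int) - 1) (left + 1)
        (by omega) (by omega) (by omega)
    have tD : pvScanDn cs (PySem.List.pyGetD cs left ' ') (left + 1) (left + w - 1)
        = pvScanDn cs (PySem.List.pyGetD cs left ' ') 0 (left + w - 1) :=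
      pvScanDn_trunc cs _ (left + 1) 0 (left + w - 1) (by omega) (by omega) (by omega)
    rw [hnx, hpv, tU, tD]
    set L := pvScanUp cs (PySem.List.pyGetD cs left ' ') ((cs.length : Int) - 1) (left + 1)
      with hLdef
    set R := pvScanDn cs (PySem.List.pyGetD cs left ' ') 0 (left + w - 1) with hRdef
    have hLge : left + 1 ≤ L := sU.1.1
    have hRle : R ≤ left + w - 1 := sD.1.2
    have hGT : L > R ↔ L = left + w := by
      constructor
      · intro hgt
        by_contra hne
        have hL9 : L ≤ left + w - 1 := by omega
        have hcL : PySem.List.pyGetD cs L ' ' = PySem.List.pyGetD cs left ' ' :=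
          sU.2.2 (by omega)
        exact sD.2.1 L (by omega) (by omega) hcL
      · intro he; omega
    conv_rhs => rw [if_congr hGT rfl rfl]
    rw [e1]
    by_cases hb1 : L = left + w
    · rw [if_pos hb1, if_pos hb1]
    · rw [if_neg hb1, if_neg hb1]
      by_cases hb2 : L = R
      · rw [if_pos hb2, if_pos hb2]
      · rw [if_neg hb2, if_neg hb2]
        have hnGT : ¬ L > R := fun hgt => hb1 (hGT.mp hgt)
        have hLR : L < R := by omega
        have e2 : pvG dp (L + 1) (R - 1) = pvHelper cs (w.toNat + 1) (L + 1) (R - 1) := by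
          by_cases hcr : R - 1 < L + 1
          · rw [hInv.2.2 (L + 1) (R - 1) (by omega) (by omega), if_neg (by omega),
                pvHelper_cross cs _ _ _ (by omega)]
          · rw [hInv.2.2 (L + 1) (R - 1) (by omega) (by omega), if_pos (by omega), pvH]
            exact pvHelper_fuel cs (R - 1 - (L + 1)).toNat _ _ _ _ rfl le_rfl (by omega)
        rw [e2]
  · rw [if_neg hc, if_neg hc]
    have e3 : pvG dp (left + 1) (left + w)
        = pvHelper cs (w.toNat + 1) (left + 1) (left + w) := by
      rw [hInv.2.2 (left + 1) (left + w) (by omega) (by omega), if_pos (by omega), pvH]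
      exact pvHelper_fuel cs (left + w - (left + 1)).toNat _ _ _ _ rfl le_rfl (by omega)
    have e4 : pvG dp left (left + w - 1)
        = pvHelper cs (w.toNat + 1) left (left + w - 1) := by
      rw [hInv.2.2 left (left + w - 1) (by omega) (by omega), if_pos (by omega), pvH]
      exact pvHelper_fuel cs (left + w - 1 - left).toNat _ _ _ _ rfl le_rfl (by omega)
    rw [e3, e4, e1]

theorem pvInner (cs : List Char) (w : Int) (hw : 1 ≤ w) (hwn : w < (cs.length : Int))
    (left : Int) (dp : List (List Int)) (h0 : 0 ≤ left) (hle : left ≤ (cs.length : Int) - w)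
    (hInv : pvInvAt cs dp w left) :
    pvInvAt cs
      ((PySem.List.pyRange left ((cs.length : Int) - w) 1).foldl
        (fun dp left => pvStep cs (pvMkNxt cs) (pvMkPrv cs) dp w left) dp)
      w ((cs.length : Int) - w) := by
  by_cases hend : (cs.length : Int) - w ≤ left
  · have hl2 : left = (cs.length : Int) - w := by omega
    subst hl2
    rw [PySem.List.pyRange_one_eq_nil le_rfl, List.foldl_nil]
    exact hInv
  · rw [PySem.List.pyRange_one_cons (by omega), List.foldl_cons]
    refine pvInner cs w hw hwn (left + 1) _ (by omega) (by omega) ?_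
    have hrowl : (dp.getD left.toNat []).length = cs.length :=
      pvRowLen cs dp hInv.1 hInv.2.1 left h0 (by omega)
    unfold pvStep
    refine ⟨?_, ?_, ?_⟩
    · rw [PySem.List.length_pySetD]; exact hInv.1
    · rw [PySem.List.pySetD_of_nonneg _ _ h0]
      refine pvRowsSet cs dp hInv.2.1 left.toNat _ ?_
      rw [PySem.List.length_pySetD, pvGetD_nonneg _ _ _ h0]
      exact hrowl
    · intro a b ha hb
      rw [pvG_set dp left (left + w) _ a b h0 (by omega) (by rw [hrowl]; omega) ha hb]
      by_cases hkey : a = left ∧ b = left + w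
      · obtain ⟨rfl, rfl⟩ := hkey
        rw [if_pos ⟨rfl, rfl⟩, if_pos (by omega)]
        exact pvCell_correct cs dp w a hw ha (by omega) hInv
      · rw [if_neg hkey, hInv.2.2 a b ha hb]
        by_cases hcond : a ≤ b ∧ b < (cs.length : Int) ∧ (b - a < w ∨ (b - a = w ∧ a < left))
        · rw [if_pos hcond, if_pos (by omega)]
        · rw [if_neg hcond, if_neg (by omega)]
termination_by ((cs.length : Int) - w - left).toNat

theorem pvInv_shift (cs : List Char) (dp : List (List Int)) (w : Int)
    (h : pvInvAt cs dp w ((cs.length : Int) - w)) : pvInvAt cs dp (w + 1) 0 := by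
  refine ⟨h.1, h.2.1, ?_⟩
  intro a b ha hb
  rw [h.2.2 a b ha hb]
  have hiff : (a ≤ b ∧ b < (cs.length : Int) ∧
        (b - a < w ∨ (b - a = w ∧ a < (cs.length : Int) - w)))
      ↔ (a ≤ b ∧ b < (cs.length : Int) ∧ (b - a < w + 1 ∨ (b - a = w + 1 ∧ a < 0))) := by
    omega
  rw [if_congr hiff rfl rfl]

theorem pvOuter (cs : List Char) (w : Int) (hw : 1 ≤ w) (hn : w ≤ (cs.length : Int)) :
    pvInvAt cs
      ((PySem.List.pyRange 1 w 1).foldl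
        (fun dp w' =>
          (PySem.List.pyRange 0 ((cs.length : Int) - w') 1).foldl
            (fun dp left => pvStep cs (pvMkNxt cs) (pvMkPrv cs) dp w' left) dp)
        (pvDpInit cs))
      w 0 := by
  by_cases hw1 : w ≤ 1
  · have hweq : w = 1 := by omega
    subst hweq
    rw [PySem.List.pyRange_one_eq_nil le_rfl, List.foldl_nil]
    exact pvDpInit_inv cs
  · have hsplit : PySem.List.pyRange 1 w 1 = PySem.List.pyRange 1 (w - 1) 1 ++ [w - 1] := by
      have h := PySem.List.pyRange_one_succ_right (a := 1) (b := w - 1) (by omega)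
      simpa [show w - 1 + 1 = w from by ring] using h
    rw [hsplit, List.foldl_append, List.foldl_cons, List.foldl_nil]
    have hprev := pvOuter cs (w - 1) (by omega) (by omega)
    have hinner := pvInner cs (w - 1) (by omega) (by omega) 0 _ le_rfl (by omega) hprev
    have hshift := pvInv_shift cs _ (w - 1) hinner
    simpa [show w - 1 + 1 = w from by ring] using hshift
termination_by (w - 1).toNat

-- ===== VERDICT (by name: the statement is the Claim_ definition above) =====
theorem countPalindromicSubsequences3_spec : Claim_equal_countPalindromicSubsequences3 := by
  unfold Claim_equal_countPalindromicSubsequences3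
  intro s _
  unfold Spec_countPalindromicSubsequences3
  unfold countPalindromicSubsequences3 countPalindromicSubsequences3_alt
  simp only []
  by_cases h0 : (s.toList.length : Int) = 0
  · rw [if_pos h0]
    exact pvHelper_cross s.toList _ 0 _ (by omega)
  · rw [if_neg h0]
    have H := (pvOuter s.toList (s.toList.length : Int) (by omega) le_rfl).2.2 0
      ((s.toList.length : Int) - 1) le_rfl (by omega)
    rw [if_pos (by omega)] at H
    rw [H, pvH, show (((s.toList.length : Int) - 1 - 0).toNat + 2) = s.toList.length + 1
      from by omega]
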